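-- pv_equiv track=rewrite | github.com/yehnan/project_euler_python | p145.py | is_reversible
-- ===== SOURCE A (Python) =====
-- def is_reversible(n):
--     ns = str(n)
--     ms = ns[::-1]
--     m = int(ms)
--
--     if len(str(m)) < len(ns):
--         return False
--
--     tmp = n + m
--     for d in str(tmp):
--         if d not in '13579':
--             return False
--     return True
-- ===== SOURCE B (Python) =====
-- def is_reversible(n):
--     if n % 10 == 0:  # covers n == 0 and trailing-zero (leading zero after reversal)
--         return False
--     rev = 0
--     t = n
--     while t > 0:
--         rev = rev * 10 + t % 10
--         t //= 10
--     s = n + rev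
--     while s > 0:
--         if s % 10 % 2 == 0:
--             return False
--         s //= 10
--     return True
-- ===== Notes on version B (the rewrite author's own statement) =====
-- stated objective: faster
-- what changed: Replaces string conversion, slicing and per-character parsing (str/[::-1]/int and a digit-membership scan over str(n+m)) with pure integer arithmetic: the reversal is computed by a %10-//10 accumulator loop, the leading-zero test becomes the equivalent trailing-zero test n % 10 == 0, and oddness of every digit of n+rev is checked by a %10 loop.
import Mathlib
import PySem

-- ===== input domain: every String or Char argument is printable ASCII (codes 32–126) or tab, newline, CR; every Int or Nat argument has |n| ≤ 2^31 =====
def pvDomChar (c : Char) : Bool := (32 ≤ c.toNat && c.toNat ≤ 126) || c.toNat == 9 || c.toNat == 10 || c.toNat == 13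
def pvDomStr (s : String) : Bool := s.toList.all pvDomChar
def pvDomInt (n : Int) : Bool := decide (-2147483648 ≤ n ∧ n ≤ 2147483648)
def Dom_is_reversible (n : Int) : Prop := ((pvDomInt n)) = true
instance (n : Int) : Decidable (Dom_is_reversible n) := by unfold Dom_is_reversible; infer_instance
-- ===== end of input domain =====

-- B replaces A's string reversal/parse with integer %10-//10 loops; equivalence is on return values for n ≥ 0.

-- ===== PORT A =====
def is_reversible (n : Int) : Bool :=
  let ns : List Char := PySem.Int.toChars n
  match PySem.Chars.slice? ns none none (-1) with
  | none => false                                    -- unreachable: step -1 ≠ 0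
  | some ms =>
    match PySem.Int.ofChars? ms with
    | none => false                                  -- int(ms) raises ValueError (n < 0); outside Pre_
    | some m =>
      if PySem.Chars.len (PySem.Int.toChars m) < PySem.Chars.len ns then false
      else (PySem.Int.toChars (n + m)).all (fun d => PySem.Chars.isIn [d] ['1', '3', '5', '7', '9'])

-- ===== PORT B =====
def pvRevLoop (t rev : Int) : Int :=
  if _h : 0 < t then pvRevLoop (PySem.Int.floordiv t 10) (rev * 10 + PySem.Int.mod t 10) else rev
termination_by t.toNat
decreasing_by
  simp only [PySem.Int.floordiv_eq_ediv_of_pos (by norm_num : (0:Int) < 10)]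
  omega

def pvOddLoop (s : Int) : Bool :=
  if _h : 0 < s then
    if PySem.Int.mod (PySem.Int.mod s 10) 2 == 0 then false
    else pvOddLoop (PySem.Int.floordiv s 10)
  else true
termination_by s.toNat
decreasing_by
  simp only [PySem.Int.floordiv_eq_ediv_of_pos (by norm_num : (0:Int) < 10)]
  omega

def is_reversible_alt (n : Int) : Bool :=
  if PySem.Int.mod n 10 == 0 then false
  else pvOddLoop (n + pvRevLoop n 0)

-- ===== PRECONDITION & SPEC =====
-- Pre_ excludes n < 0, where Python A raises ValueError: str(n) starts with '-', so int(str(n)[::-1]) fails.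
def Pre_is_reversible (n : Int) : Prop := 0 ≤ n
instance (n : Int) : Decidable (Pre_is_reversible n) := by unfold Pre_is_reversible; infer_instance
def pvWitness_is_reversible : Int := 36
def Spec_is_reversible (n : Int) (out : Bool) : Prop := out = is_reversible_alt n
instance (n : Int) (out : Bool) : Decidable (Spec_is_reversible n out) := by unfold Spec_is_reversible; infer_instance

-- ===== CLAIM (what is proved, stated in full; the proofs are below) =====
def Claim_equal_is_reversible : Prop := ∀ (n : Int), Dom_is_reversible n → Pre_is_reversible n → Spec_is_reversible n (is_reversible n)

-- ===== LEMMAS AND PROOFS =====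

-- Replica of the (private) digit-accumulator of PySem.Int.ofChars?, used only to characterise A's parse.
def myGo : List Char → Bool → Nat → Option Nat
  | [], afterDigit, acc => if afterDigit = true then some acc else none
  | c :: rest, afterDigit, acc =>
    if c.isDigit = true then myGo rest true (acc * 10 + (c.toNat - '0'.toNat))
    else if c = '_' ∧ afterDigit = true then
      match rest with
      | d :: _ => if d.isDigit = true then myGo rest false acc else none
      | [] => none
    else none

def myDigitsValG (g : List Char → Bool → Nat → Option Nat) (ds : List Char) : Option Nat :=
  match ds with
  | [] => none
  | cs => g cs false 0

def myOfCharsG (g : List Char → Bool → Nat → Option Nat) (s : List Char) : Option Int :=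
  match ((s.dropWhile PySem.Int.isIntSpace).reverse.dropWhile PySem.Int.isIntSpace).reverse with
  | '-' :: ds => (do let a ← myDigitsValG g ds; pure ((a : Int))).map (fun n => -n)
  | '+' :: ds => (do let a ← myDigitsValG g ds; pure ((a : Int))).map (fun n => n)
  | ds => (do let a ← myDigitsValG g ds; pure ((a : Int))).map (fun n => n)

lemma myOfCharsG_congr (g : List Char → Bool → Nat → Option Nat) (h : g = myGo)
    (s : List Char) (v : Option Int) (hv : myOfCharsG myGo s = v) : myOfCharsG g s = v := by
  rw [h]; exact hv

-- A's int(·) equals the replica (the capture of the private accumulator happens by unification).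
lemma ofChars?_eq (s : List Char) : PySem.Int.ofChars? s = myOfCharsG myGo s := by
  apply myOfCharsG_congr
  · funext cs
    induction cs with
    | nil => funext a acc; rfl
    | cons c rest ih =>
      funext a acc
      rw [myGo.eq_def]
      split
      next h1 => simp at h1
      next c2 rest2 h2 =>
        injection h2 with hc hr
        subst hc; subst hr
        rw [← ih]
        rfl
  · rfl

-- arithmetic value of a digit list (most significant first as processed by the parser)
def digFold (acc : Nat) (l : List Nat) : Nat := l.foldl (fun v d => v * 10 + d) acc

lemma digitChar_isDigit {d : Nat} (h : d < 10) : (Nat.digitChar d).isDigit = true := by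
  interval_cases d <;> decide

lemma digitChar_notSpace {d : Nat} (h : d < 10) : PySem.Int.isIntSpace (Nat.digitChar d) = false := by
  interval_cases d <;> decide

lemma digitChar_odd {d : Nat} (h : d < 10) :
    PySem.Chars.isIn [Nat.digitChar d] ['1', '3', '5', '7', '9'] = decide (d % 2 = 1) := by
  interval_cases d <;> decide

lemma dropWhile_eq_self_of_all {p : Char → Bool} {l : List Char} (h : ∀ c ∈ l, p c = false) :
    l.dropWhile p = l := by
  cases l with
  | nil => rfl
  | cons c t => exact List.dropWhile_cons_of_neg (by simp [h c (List.mem_cons_self)])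

lemma goDigits (l : List Nat) : ∀ (a : Bool) (acc : Nat), (∀ d ∈ l, d < 10) →
    (l ≠ [] ∨ a = true) → myGo (l.map Nat.digitChar) a acc = some (digFold acc l) := by
  induction l with
  | nil =>
    intro a acc _ hne
    rcases hne with h | h
    · exact absurd rfl h
    · subst h; rfl
  | cons d t ih =>
    intro a acc hlt _
    have hd : d < 10 := hlt d (List.mem_cons_self)
    have ihh := ih true (acc * 10 + d) (fun x hx => hlt x (List.mem_cons_of_mem _ hx)) (Or.inr rfl)
    have hfold : digFold acc (d :: t) = digFold (acc * 10 + d) t := rfl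
    rw [List.map_cons, hfold]
    interval_cases d <;> exact Eq.trans rfl ihh

lemma parse_digits (l : List Nat) (hne : l ≠ []) (hlt : ∀ d ∈ l, d < 10) :
    PySem.Int.ofChars? (l.map Nat.digitChar) = some ((digFold 0 l : Nat) : Int) := by
  rw [ofChars?_eq]
  have hns : ∀ c ∈ l.map Nat.digitChar, PySem.Int.isIntSpace c = false := by
    intro c hc
    rcases List.mem_map.mp hc with ⟨d, hd, rfl⟩
    exact digitChar_notSpace (hlt d hd)
  have hstrip : (((l.map Nat.digitChar).dropWhile PySem.Int.isIntSpace).reverse.dropWhile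
      PySem.Int.isIntSpace).reverse = l.map Nat.digitChar := by
    rw [dropWhile_eq_self_of_all hns, dropWhile_eq_self_of_all (by simpa using hns), List.reverse_reverse]
  rcases l with _ | ⟨d, t⟩
  · exact absurd rfl hne
  · have hd : d < 10 := hlt d (List.mem_cons_self)
    have hdig := digitChar_isDigit hd
    unfold myOfCharsG
    rw [hstrip, List.map_cons]
    split
    next ds heq =>
      injection heq with h1 _
      rw [h1] at hdig
      exact absurd hdig (by decide)
    next ds heq =>
      injection heq with h1 _
      rw [h1] at hdig
      exact absurd hdig (by decide)
    next =>
      rw [show myDigitsValG myGo (Nat.digitChar d :: t.map Nat.digitChar) =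
            myGo (Nat.digitChar d :: t.map Nat.digitChar) false 0 from rfl,
        ← List.map_cons, goDigits (d :: t) false 0 hlt (Or.inl (by simp))]
      rfl

-- str(k) for k > 0: decimal digit characters, most significant first
lemma toDigitsCore_eq : ∀ (fuel n : Nat) (ds : List Char), 0 < n → n < fuel →
    Nat.toDigitsCore 10 fuel n ds = ((Nat.digits 10 n).map Nat.digitChar).reverse ++ ds := by
  intro fuel
  induction fuel with
  | zero => intro n ds _ h; omega
  | succ f ih =>
    intro n ds hn hlt
    have hstep : Nat.toDigitsCore 10 (f + 1) n ds =
        (if n / 10 = 0 then (n % 10).digitChar :: ds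
         else Nat.toDigitsCore 10 f (n / 10) ((n % 10).digitChar :: ds)) := rfl
    rw [hstep]
    by_cases h0 : n / 10 = 0
    · rw [if_pos h0, Nat.digits_def' (by norm_num : 1 < 10) hn, h0, Nat.digits_zero]
      rfl
    · rw [if_neg h0, ih (n / 10) _ (Nat.pos_of_ne_zero h0) (by omega),
        Nat.digits_def' (by norm_num : 1 < 10) hn]
      simp

lemma toChars_pos {k : Nat} (hk : 0 < k) :
    PySem.Int.toChars (k : Int) = ((Nat.digits 10 k).map Nat.digitChar).reverse := by
  rw [PySem.Int.toChars, if_neg (by omega)]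
  have : ((k : Int)).toNat = k := rfl
  rw [this, Nat.toDigits, toDigitsCore_eq (k + 1) k [] hk (by omega), List.append_nil]

lemma digFold_lt (l : List Nat) : ∀ acc, (∀ d ∈ l, d < 10) → digFold acc l < (acc + 1) * 10 ^ l.length := by
  induction l with
  | nil => intro acc _; simp [digFold]
  | cons d t ih =>
    intro acc h
    have hd : d < 10 := h d (List.mem_cons_self)
    have h1 : digFold (acc * 10 + d) t < (acc * 10 + d + 1) * 10 ^ t.length :=
      ih _ (fun x hx => h x (List.mem_cons_of_mem _ hx))
    have h2 : (acc * 10 + d + 1) * 10 ^ t.length ≤ (acc + 1) * 10 ^ (t.length + 1) := by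
      rw [pow_succ]
      calc (acc * 10 + d + 1) * 10 ^ t.length ≤ ((acc + 1) * 10) * 10 ^ t.length := by
            apply Nat.mul_le_mul_right; omega
        _ = (acc + 1) * (10 ^ t.length * 10) := by ring
    calc digFold acc (d :: t) = digFold (acc * 10 + d) t := rfl
      _ < (acc * 10 + d + 1) * 10 ^ t.length := h1
      _ ≤ (acc + 1) * 10 ^ (d :: t).length := by simpa using h2
lemma le_digFold (l : List Nat) : ∀ acc, acc * 10 ^ l.length ≤ digFold acc l := by
  induction l with
  | nil => intro acc; simp [digFold]
  | cons d t ih =>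
    intro acc
    calc acc * 10 ^ (d :: t).length = (acc * 10) * 10 ^ t.length := by rw [List.length_cons, pow_succ]; ring
      _ ≤ (acc * 10 + d) * 10 ^ t.length := Nat.mul_le_mul_right _ (by omega)
      _ ≤ digFold (acc * 10 + d) t := ih _
      _ = digFold acc (d :: t) := rfl

-- B's reversal loop computes the same Horner fold over the decimal digits
lemma revLoop_eq (k : Nat) : ∀ r : Nat, pvRevLoop (k : Int) (r : Int) = ((digFold r (Nat.digits 10 k) : Nat) : Int) := by
  induction k using Nat.strong_induction_on with
  | _ k ih =>
    intro r
    rw [pvRevLoop]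
    by_cases hk : 0 < k
    · rw [dif_pos (by exact_mod_cast hk)]
      have hmod : PySem.Int.mod (k : Int) 10 = ((k % 10 : Nat) : Int) := PySem.Int.mod_natCast k 10
      have hdiv : PySem.Int.floordiv (k : Int) 10 = ((k / 10 : Nat) : Int) := PySem.Int.floordiv_natCast k 10
      rw [hmod, hdiv]
      have : (r : Int) * 10 + ((k % 10 : Nat) : Int) = ((r * 10 + k % 10 : Nat) : Int) := by push_cast; ring
      rw [this, ih (k / 10) (Nat.div_lt_self hk (by norm_num)) (r * 10 + k % 10),
        Nat.digits_def' (by norm_num : 1 < 10) hk]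
      rfl
    · rw [dif_neg (by exact_mod_cast hk)]
      have : k = 0 := by omega
      subst this
      rfl

-- B's oddness loop checks that every decimal digit is odd
lemma oddLoop_eq (k : Nat) : pvOddLoop (k : Int) = (Nat.digits 10 k).all (fun d => decide (d % 2 = 1)) := by
  induction k using Nat.strong_induction_on with
  | _ k ih =>
    rw [pvOddLoop]
    by_cases hk : 0 < k
    · rw [dif_pos (by exact_mod_cast hk)]
      have hmod : PySem.Int.mod (k : Int) 10 = ((k % 10 : Nat) : Int) := PySem.Int.mod_natCast k 10
      have hmod2 : PySem.Int.mod ((k % 10 : Nat) : Int) 2 = ((k % 10 % 2 : Nat) : Int) := PySem.Int.mod_natCast _ 2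
      have hdiv : PySem.Int.floordiv (k : Int) 10 = ((k / 10 : Nat) : Int) := PySem.Int.floordiv_natCast k 10
      rw [hmod, hmod2, hdiv, Nat.digits_def' (by norm_num : 1 < 10) hk, List.all_cons,
        ih (k / 10) (Nat.div_lt_self hk (by norm_num))]
      by_cases he : k % 10 % 2 = 0
      · rw [if_pos (show ((((k % 10 % 2 : Nat) : Int)) == 0) = true by simp only [beq_iff_eq, Int.natCast_eq_zero]; exact he),
          decide_eq_false (by omega : ¬ k % 10 % 2 = 1)]
        rfl
      · rw [if_neg (show ¬ ((((k % 10 % 2 : Nat) : Int)) == 0) = true by simp only [beq_iff_eq, Int.natCast_eq_zero]; exact he),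
          decide_eq_true (by omega : k % 10 % 2 = 1)]
        rfl
    · rw [dif_neg (by exact_mod_cast hk)]
      have : k = 0 := by omega
      subst this
      rfl

lemma allChars_eq (l : List Nat) (h : ∀ d ∈ l, d < 10) :
    (l.map Nat.digitChar).all (fun d => PySem.Chars.isIn [d] ['1', '3', '5', '7', '9']) =
      l.all (fun d => decide (d % 2 = 1)) := by
  induction l with
  | nil => rfl
  | cons d t ih =>
    simp only [List.map_cons, List.all_cons]
    rw [digitChar_odd (h d (List.mem_cons_self)), ih (fun x hx => h x (List.mem_cons_of_mem _ hx))]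

lemma toChars_len_lt {v L : Nat} (hv : v < 10 ^ (L - 1)) (hL : 2 ≤ L) :
    (PySem.Int.toChars ((v : Nat) : Int)).length < L := by
  rcases Nat.eq_zero_or_pos v with rfl | hvpos
  · have h0 : PySem.Int.toChars ((0 : Nat) : Int) = ['0'] := rfl
    rw [h0]
    simp only [List.length_cons, List.length_nil]
    omega
  · rw [toChars_pos hvpos]
    simp only [List.length_reverse, List.length_map]
    have := (Nat.digits_length_le_iff (by norm_num : 1 < 10) v).mpr hv
    omega

lemma is_reversible_char (k : Nat) (hk : 0 < k) :
    is_reversible (k : Int) =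
      (if PySem.Chars.len (PySem.Int.toChars ((digFold 0 (Nat.digits 10 k) : Nat) : Int)) <
          PySem.Chars.len (((Nat.digits 10 k).map Nat.digitChar).reverse) then false
       else (PySem.Int.toChars ((k : Int) + ((digFold 0 (Nat.digits 10 k) : Nat) : Int))).all
         (fun d => PySem.Chars.isIn [d] ['1', '3', '5', '7', '9'])) := by
  have hl : ∀ d ∈ Nat.digits 10 k, d < 10 := fun d hd => Nat.digits_lt_base (by norm_num) hd
  have hlne : Nat.digits 10 k ≠ [] := Nat.digits_ne_nil_iff_ne_zero.mpr (by omega)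
  have hslice : PySem.Chars.slice? (((Nat.digits 10 k).map Nat.digitChar).reverse) none none (-1)
      = some ((Nat.digits 10 k).map Nat.digitChar) := by
    rw [PySem.Chars.slice?_eq_listSlice?, PySem.List.slice?_none_none_neg_one, List.reverse_reverse]
  simp only [is_reversible]
  rw [toChars_pos hk, hslice]
  show (match PySem.Int.ofChars? ((Nat.digits 10 k).map Nat.digitChar) with
        | none => false
        | some m =>
          if PySem.Chars.len (PySem.Int.toChars m) <
              PySem.Chars.len (((Nat.digits 10 k).map Nat.digitChar).reverse) then false
          else (PySem.Int.toChars ((k : Int) + m)).all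
            (fun d => PySem.Chars.isIn [d] ['1', '3', '5', '7', '9'])) = _
  rw [parse_digits _ hlne hl]

-- ===== VERDICT (by name: the statement is the Claim_ definition above) =====
theorem is_reversible_spec : Claim_equal_is_reversible := by
  intro n _ hpre
  unfold Spec_is_reversible
  obtain ⟨k, rfl⟩ : ∃ k : Nat, n = (k : Int) := ⟨n.toNat, (Int.toNat_of_nonneg hpre).symm⟩
  rcases Nat.eq_zero_or_pos k with rfl | hk
  · decide
  · have hl : ∀ d ∈ Nat.digits 10 k, d < 10 := fun d hd => Nat.digits_lt_base (by norm_num) hd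
    have htl : ∀ d ∈ Nat.digits 10 (k / 10), d < 10 := fun d hd => Nat.digits_lt_base (by norm_num) hd
    have hA := is_reversible_char k hk
    by_cases hm : k % 10 = 0
    · -- trailing zero: both sides return false
      have hd' : Nat.digits 10 k = 0 :: Nat.digits 10 (k / 10) := by
        rw [Nat.digits_def' (by norm_num : 1 < 10) hk, hm]
      have hk10 : 0 < k / 10 := by omega
      have htne : Nat.digits 10 (k / 10) ≠ [] := Nat.digits_ne_nil_iff_ne_zero.mpr (by omega)
      have htlen : 1 ≤ (Nat.digits 10 (k / 10)).length := List.length_pos_of_ne_nil htne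
      have hVe : digFold 0 (Nat.digits 10 k) = digFold 0 (Nat.digits 10 (k / 10)) := by
        rw [hd']; rfl
      have hVlt : digFold 0 (Nat.digits 10 k) < 10 ^ (Nat.digits 10 (k / 10)).length := by
        rw [hVe]
        have := digFold_lt (Nat.digits 10 (k / 10)) 0 htl
        simpa using this
      have hLlen : (Nat.digits 10 k).length = (Nat.digits 10 (k / 10)).length + 1 := by
        rw [hd']; rfl
      have hlen : (PySem.Int.toChars ((digFold 0 (Nat.digits 10 k) : Nat) : Int)).length <
          (Nat.digits 10 k).length := by
        have := toChars_len_lt (v := digFold 0 (Nat.digits 10 k))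
          (L := (Nat.digits 10 k).length) (by rw [hLlen]; simpa using hVlt) (by omega)
        exact this
      have hcond : PySem.Chars.len (PySem.Int.toChars ((digFold 0 (Nat.digits 10 k) : Nat) : Int)) <
          PySem.Chars.len (((Nat.digits 10 k).map Nat.digitChar).reverse) := by
        rw [PySem.Chars.len_eq, PySem.Chars.len_eq, List.length_reverse, List.length_map]
        exact_mod_cast hlen
      rw [hA, if_pos hcond]
      unfold is_reversible_alt
      rw [show PySem.Int.mod ((k : Nat) : Int) 10 = ((k % 10 : Nat) : Int) from
        PySem.Int.mod_natCast k 10]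
      rw [if_pos (show (((k % 10 : Nat) : Int) == 0) = true by rw [hm]; rfl)]
    · -- no trailing zero: digit-lengths agree, both sides test oddness of the digits of k + rev
      have hd' : Nat.digits 10 k = (k % 10) :: Nat.digits 10 (k / 10) :=
        Nat.digits_def' (by norm_num : 1 < 10) hk
      have hVe : digFold 0 (Nat.digits 10 k) = digFold (k % 10) (Nat.digits 10 (k / 10)) := by
        rw [hd']; simp [digFold]
      have hm10 : k % 10 < 10 := by omega
      have hVge : 10 ^ (Nat.digits 10 (k / 10)).length ≤ digFold 0 (Nat.digits 10 k) := by
        rw [hVe]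
        calc 10 ^ (Nat.digits 10 (k / 10)).length
            ≤ (k % 10) * 10 ^ (Nat.digits 10 (k / 10)).length :=
              Nat.le_mul_of_pos_left _ (by omega)
          _ ≤ digFold (k % 10) (Nat.digits 10 (k / 10)) := le_digFold _ _
      have hVlt : digFold 0 (Nat.digits 10 k) < 10 ^ ((Nat.digits 10 (k / 10)).length + 1) := by
        rw [hVe]
        calc digFold (k % 10) (Nat.digits 10 (k / 10))
            < (k % 10 + 1) * 10 ^ (Nat.digits 10 (k / 10)).length := digFold_lt _ _ htl
          _ ≤ 10 * 10 ^ (Nat.digits 10 (k / 10)).length := Nat.mul_le_mul_right _ (by omega)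
          _ = 10 ^ ((Nat.digits 10 (k / 10)).length + 1) := by rw [pow_succ]; ring
      have hVpos : 0 < digFold 0 (Nat.digits 10 k) :=
        lt_of_lt_of_le (pow_pos (by norm_num : (0:ℕ) < 10) _) hVge
      have hlenV : (Nat.digits 10 (digFold 0 (Nat.digits 10 k))).length =
          (Nat.digits 10 (k / 10)).length + 1 := by
        have h1 := (Nat.digits_length_le_iff (by norm_num : 1 < 10) _).mpr hVlt
        have h2 := (Nat.lt_digits_length_iff (by norm_num : 1 < 10) _).mpr hVge
        omega
      have hLlen : (Nat.digits 10 k).length = (Nat.digits 10 (k / 10)).length + 1 := by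
        rw [hd']; rfl
      have hcond : ¬ (PySem.Chars.len (PySem.Int.toChars ((digFold 0 (Nat.digits 10 k) : Nat) : Int)) <
          PySem.Chars.len (((Nat.digits 10 k).map Nat.digitChar).reverse)) := by
        rw [PySem.Chars.len_eq, PySem.Chars.len_eq, List.length_reverse, List.length_map,
          toChars_pos hVpos]
        simp only [List.length_reverse, List.length_map]
        rw [hlenV, hLlen]
        omega
      have hcast : (k : Int) + ((digFold 0 (Nat.digits 10 k) : Nat) : Int) =
          ((k + digFold 0 (Nat.digits 10 k) : Nat) : Int) := by push_cast; ring
      rw [hA, if_neg hcond, hcast, toChars_pos (by omega : 0 < k + digFold 0 (Nat.digits 10 k)),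
        List.all_reverse, allChars_eq _ (fun d hd => Nat.digits_lt_base (by norm_num) hd)]
      unfold is_reversible_alt
      rw [show PySem.Int.mod ((k : Nat) : Int) 10 = ((k % 10 : Nat) : Int) from
        PySem.Int.mod_natCast k 10]
      rw [if_neg (show ¬ (((k % 10 : Nat) : Int) == 0) = true by
        simp only [beq_iff_eq, Int.natCast_eq_zero]; exact hm)]
      rw [show (0 : Int) = ((0 : Nat) : Int) from rfl, revLoop_eq k 0, hcast, oddLoop_eq]
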